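-- pv_equiv track=rewrite | github.com/DustyDoesCode/DSA2Task2Project | main.py | _group_onboard
-- ===== SOURCE A (Python) =====
-- from typing import Optional, List, Tuple, Iterable
--
-- GROUP_G1 = [13, 14, 15, 16, 19, 20]
--
-- def _group_onboard(chosen: List[int]) -> bool:
--     # Check if all G1 members are present when any are chosen
--     any_member = any(pid in chosen for pid in GROUP_G1)
--     if not any_member:
--         return True
--     for pid in GROUP_G1:
--         if pid not in chosen:
--             return False
--     return True
-- ===== SOURCE B (Python) =====
-- GROUP_G1 = [13, 14, 15, 16, 19, 20]
--
-- def _group_onboard(chosen):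
--     # Scan the input once, collecting which group members occur into a set,
--     # then state the all-or-nothing invariant as a cardinality check.
--     seen = set()
--     for x in chosen:
--         if x in GROUP_G1:
--             seen.add(x)
--     return len(seen) in (0, len(GROUP_G1))
-- ===== Notes on version B (the rewrite author's own statement) =====
-- stated objective: alternative
-- what changed: Inverts the traversal: instead of A's two scans over GROUP_G1 with membership tests into chosen, B scans chosen once, accumulating the set of group members encountered, and decides by the set's cardinality (0 or the full group size).
import Mathlib
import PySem

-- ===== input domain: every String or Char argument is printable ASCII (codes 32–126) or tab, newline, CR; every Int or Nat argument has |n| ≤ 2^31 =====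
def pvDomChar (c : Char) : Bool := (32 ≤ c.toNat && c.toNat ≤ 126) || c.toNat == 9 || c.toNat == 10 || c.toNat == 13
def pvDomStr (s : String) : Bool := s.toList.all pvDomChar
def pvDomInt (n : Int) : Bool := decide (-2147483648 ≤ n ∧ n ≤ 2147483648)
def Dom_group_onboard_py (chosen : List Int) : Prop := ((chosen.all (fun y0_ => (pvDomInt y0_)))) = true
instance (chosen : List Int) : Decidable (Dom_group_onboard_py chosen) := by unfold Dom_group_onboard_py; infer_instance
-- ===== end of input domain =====

-- B inverts the traversal: one scan of `chosen` collecting the set of group members seen, then a cardinality check (objective: alternative).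


-- ===== PORT A =====
def pvGROUP_G1 : List Int := [13, 14, 15, 16, 19, 20]

-- 'for pid in GROUP_G1: if pid not in chosen: return False'
def pvALoop (chosen : List Int) : List Int → Bool
  | [] => true
  | pid :: rest => if ¬ (chosen.contains pid) then false else pvALoop chosen rest

def group_onboard_py (chosen : List Int) : Bool :=
  let any_member := pvGROUP_G1.any (fun pid => chosen.contains pid)
  if ¬ any_member then true
  else pvALoop chosen pvGROUP_G1

-- ===== PORT B =====
-- 'seen = set(); for x in chosen: if x in GROUP_G1: seen.add(x)'
def pvBLoop : List Int → PySem.Set Int → PySem.Set Int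
  | [], seen => seen
  | x :: rest, seen =>
      pvBLoop rest (if pvGROUP_G1.contains x then PySem.Set.add seen x else seen)

def group_onboard_py_alt (chosen : List Int) : Bool :=
  let seen := pvBLoop chosen PySem.Set.empty
  PySem.Set.len seen == 0 || PySem.Set.len seen == (pvGROUP_G1.length : Int)

-- ===== PRECONDITION & SPEC =====
def Spec_group_onboard_py (chosen : List Int) (out : Bool) : Prop := out = group_onboard_py_alt chosen
instance (chosen : List Int) (out : Bool) : Decidable (Spec_group_onboard_py chosen out) := by unfold Spec_group_onboard_py; infer_instance

-- ===== CLAIM (what is proved, stated in full; the proofs are below) =====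
def Claim_equal_group_onboard_py : Prop := ∀ (chosen : List Int), Dom_group_onboard_py chosen → Spec_group_onboard_py chosen (group_onboard_py chosen)

-- ===== LEMMAS AND PROOFS =====

-- membership in the accumulated set
theorem mem_pvBLoop (chosen : List Int) : ∀ (s : PySem.Set Int) (y : Int),
    y ∈ pvBLoop chosen s ↔ y ∈ s ∨ (y ∈ chosen ∧ y ∈ pvGROUP_G1) := by
  induction chosen with
  | nil => intro s y; simp [pvBLoop]
  | cons x rest ih =>
    intro s y
    by_cases hx : x ∈ pvGROUP_G1
    · simp only [pvBLoop, List.contains_eq_mem, hx, decide_true, if_true]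
      rw [ih]
      simp only [PySem.Set.mem_add, List.mem_cons]
      constructor
      · rintro ((h | rfl) | ⟨h1, h2⟩)
        · exact Or.inl h
        · exact Or.inr ⟨Or.inl rfl, hx⟩
        · exact Or.inr ⟨Or.inr h1, h2⟩
      · rintro (h | ⟨(rfl | h1), h2⟩)
        · exact Or.inl (Or.inl h)
        · exact Or.inl (Or.inr rfl)
        · exact Or.inr ⟨h1, h2⟩
    · simp only [pvBLoop, List.contains_eq_mem, hx, decide_false]
      rw [ih]
      simp only [List.mem_cons]
      constructor
      · rintro (h | ⟨h1, h2⟩)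
        · exact Or.inl h
        · exact Or.inr ⟨Or.inr h1, h2⟩
      · rintro (h | ⟨(rfl | h1), h2⟩)
        · exact Or.inl h
        · exact absurd h2 hx
        · exact Or.inr ⟨h1, h2⟩

theorem nodup_pvBLoop (chosen : List Int) : ∀ (s : PySem.Set Int),
    s.Nodup → (pvBLoop chosen s).Nodup := by
  induction chosen with
  | nil => intro s hs; simpa [pvBLoop] using hs
  | cons x rest ih =>
    intro s hs
    by_cases hx : x ∈ pvGROUP_G1
    · simp only [pvBLoop, List.contains_eq_mem, hx, decide_true, if_true]
      exact ih _ (PySem.Set.nodup_add _ _ hs)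
    · simp only [pvBLoop, List.contains_eq_mem, hx, decide_false]
      exact ih _ hs

-- the accumulated set is a permutation of the filtered group list, so its length is the filter's length
theorem len_pvBLoop (chosen : List Int) :
    (pvBLoop chosen PySem.Set.empty).length
      = (pvGROUP_G1.filter (fun g => chosen.contains g)).length := by
  apply List.Perm.length_eq
  apply (List.perm_ext_iff_of_nodup (nodup_pvBLoop chosen _ (by simp [PySem.Set.empty])) _).mpr
  · intro y
    rw [mem_pvBLoop]
    simp [PySem.Set.empty, List.mem_filter, and_comm]
  · exact List.Nodup.filter _ (by decide)

-- ===== VERDICT (by name: the statement is the Claim_ definition above) =====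
theorem group_onboard_py_spec : Claim_equal_group_onboard_py := by
  intro chosen _
  unfold Spec_group_onboard_py group_onboard_py group_onboard_py_alt
  have hlen := len_pvBLoop chosen
  simp only [PySem.Set.len, hlen]
  unfold pvGROUP_G1
  by_cases h13 : (13:Int) ∈ chosen <;>
  by_cases h14 : (14:Int) ∈ chosen <;>
  by_cases h15 : (15:Int) ∈ chosen <;>
  by_cases h16 : (16:Int) ∈ chosen <;>
  by_cases h19 : (19:Int) ∈ chosen <;>
  by_cases h20 : (20:Int) ∈ chosen <;>
    simp [pvALoop, List.filter, h13, h14, h15, h16, h19, h20]
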